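-- pv_equiv track=rewrite | github.com/hitbox/scratch | pygame/pygamelib.py | opposite_items
-- ===== SOURCE A (Python) =====
-- def opposite_items(indexable):
--     """
--     Generate two-tuples of items and their opposite from an indexable. Opposite
--     being halfway around the indexable.
--     """
--     n = len(indexable)
--     assert n % 2 == 0
--     half_n = n // 2
--     for i, item1 in enumerate(indexable):
--         j = (i + half_n) % n
--         item2 = indexable[j]
--         yield (item1, item2)
-- ===== SOURCE B (Python) =====
-- def opposite_items(indexable):
--     """
--     Generate two-tuples of items and their opposite from an indexable. Opposite
--     being halfway around the indexable.
--     """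
--     n = len(indexable)
--     assert n % 2 == 0
--     half = n // 2
--     first = indexable[:half]
--     second = indexable[half:]
--     yield from zip(first, second)
--     yield from zip(second, first)
-- ===== Notes on version B (the rewrite author's own statement) =====
-- stated objective: simpler
-- what changed: Replaces the enumerate-with-modular-index loop by splitting the sequence into two halves and emitting zip(first, second) then zip(second, first), eliminating all modular arithmetic and indexing.
import Mathlib
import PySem

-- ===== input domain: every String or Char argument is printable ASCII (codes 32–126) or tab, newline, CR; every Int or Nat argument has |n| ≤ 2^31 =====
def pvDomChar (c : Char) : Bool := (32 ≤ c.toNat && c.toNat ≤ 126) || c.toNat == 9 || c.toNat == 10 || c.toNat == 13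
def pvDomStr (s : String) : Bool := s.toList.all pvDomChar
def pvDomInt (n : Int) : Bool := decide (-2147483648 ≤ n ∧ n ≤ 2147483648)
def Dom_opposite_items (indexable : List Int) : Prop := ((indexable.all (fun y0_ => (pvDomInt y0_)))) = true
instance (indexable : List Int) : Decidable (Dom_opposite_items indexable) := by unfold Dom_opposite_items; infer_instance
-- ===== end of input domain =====

-- B replaces the enumerate-with-modular-index loop by a halves-and-zip decomposition (objective: simpler).

-- ===== PORT A =====
-- literal port of A: enumerate with modular index (i + n//2) % n; the yield loop is a map over enumerate
def opposite_items (indexable : List Int) : List (Int × Int) :=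
  let n : Int := indexable.length
  let half_n : Int := PySem.Int.floordiv n 2
  (PySem.List.enumerate indexable 0).map (fun p =>
    (p.2, (PySem.List.pyGet? indexable (PySem.Int.mod (p.1 + half_n) n)).getD 0))

-- ===== PORT B =====
def opposite_items_alt (indexable : List Int) : List (Int × Int) :=
  let n : Int := indexable.length
  let half : Int := PySem.Int.floordiv n 2
  let first := PySem.List.slice indexable none (some half)
  let second := PySem.List.slice indexable (some half) none
  first.zip second ++ second.zip first

-- ===== PRECONDITION & SPEC =====
-- A asserts n % 2 == 0 (AssertionError on odd length); Pre_ excludes exactly odd-length inputs.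
def Pre_opposite_items (indexable : List Int) : Prop := indexable.length % 2 = 0
instance (indexable : List Int) : Decidable (Pre_opposite_items indexable) := by unfold Pre_opposite_items; infer_instance
def pvWitness_opposite_items : List Int := [1, 2, 3, 4]

def Spec_opposite_items (indexable : List Int) (out : List (Int × Int)) : Prop := out = opposite_items_alt indexable
instance (indexable : List Int) (out : List (Int × Int)) : Decidable (Spec_opposite_items indexable out) := by unfold Spec_opposite_items; infer_instance

-- ===== CLAIM (what is proved, stated in full; the proofs are below) =====
def Claim_equal_opposite_items : Prop := ∀ (indexable : List Int), Dom_opposite_items indexable → Pre_opposite_items indexable → Spec_opposite_items indexable (opposite_items indexable)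

-- ===== LEMMAS AND PROOFS =====

theorem opposite_items_eq (xs : List Int) (h : Nat) (hlen : xs.length = 2 * h) :
    opposite_items xs = opposite_items_alt xs := by
  have hh : PySem.Int.floordiv (xs.length : Int) 2 = (h : Int) := by
    rw [hlen]; push_cast; rw [PySem.Int.floordiv_eq_ediv_of_pos (by omega)]; omega
  unfold opposite_items opposite_items_alt
  simp only [hh]
  rw [PySem.List.slice_to_natCast, PySem.List.slice_from_natCast]
  apply List.ext_getElem
  · simp [PySem.List.length_enumerate, hlen]; omega
  intro k hk1 hk2
  simp only [List.getElem_map, PySem.List.getElem_enumerate]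
  simp only [List.length_map, PySem.List.length_enumerate] at hk1
  by_cases hkh : k < h
  · -- first half: index j = k + h, B reads (take h).zip (drop h)
    have hmod : PySem.Int.mod ((0 + (k:Int)) + (h:Int)) (xs.length : Int) = ((k + h : Nat) : Int) := by
      rw [PySem.Int.mod_eq_emod_of_pos (by omega)]
      have : ((0 + (k:Int)) + (h:Int)) = ((k + h : Nat) : Int) := by push_cast; ring
      rw [this, Int.emod_eq_of_lt (by positivity) (by omega)]
    rw [hmod, PySem.List.pyGet?_natCast]
    have hlt : k + h < xs.length := by omega
    rw [List.getElem?_eq_getElem hlt]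
    have hb : k < ((xs.take h).zip (xs.drop h)).length := by
      simp [List.length_zip, hlen]; omega
    rw [List.getElem_append_left hb, List.getElem_zip]
    simp only [Option.getD_some]
    congr 1
    · exact (List.getElem_take).symm ▸ rfl
    · rw [List.getElem_drop]
      congr 1; omega
  · -- second half: index j = k - h, B reads (drop h).zip (take h)
    have hmod : PySem.Int.mod ((0 + (k:Int)) + (h:Int)) (xs.length : Int) = ((k - h : Nat) : Int) := by
      rw [PySem.Int.mod_eq_emod_of_pos (by omega)]
      have hb : ((0 + (k:Int)) + (h:Int)) = ((k - h : Nat) : Int) + (xs.length : Int) := by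
        omega
      have hself : (((k - h : Nat) : Int) + (xs.length : Int)) % (xs.length : Int)
          = ((k - h : Nat) : Int) % (xs.length : Int) := by
        have h1 := Int.add_mul_emod_self_left (a := ((k - h : Nat) : Int))
          (b := (xs.length : Int)) (c := 1)
        rw [mul_one] at h1
        exact h1
      rw [hb, hself]
      exact Int.emod_eq_of_lt (by positivity) (by omega)
    rw [hmod, PySem.List.pyGet?_natCast]
    have hlt : k - h < xs.length := by omega
    rw [List.getElem?_eq_getElem hlt]
    have hz1 : ((xs.take h).zip (xs.drop h)).length = h := by
      simp [List.length_zip]; omega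
    have h2 : k - h < ((xs.drop h).zip (xs.take h)).length := by
      simp [List.length_zip]; omega
    have hR : ((xs.take h).zip (xs.drop h) ++ (xs.drop h).zip (xs.take h))[k]'hk2
        = ((xs.drop h).zip (xs.take h))[k - h]'h2 := by
      rw [← Option.some_inj, ← List.getElem?_eq_getElem, ← List.getElem?_eq_getElem]
      rw [List.getElem?_append_right (by omega), hz1]
    rw [hR, List.getElem_zip]
    simp only [Option.getD_some, Prod.mk.injEq]
    constructor
    · rw [List.getElem_drop]; congr 1; omega
    · rw [List.getElem_take]

-- ===== VERDICT (by name: the statement is the Claim_ definition above) =====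
theorem opposite_items_spec : Claim_equal_opposite_items := by
  intro xs _ hpre
  unfold Pre_opposite_items at hpre
  unfold Spec_opposite_items
  exact opposite_items_eq xs (xs.length / 2) (by omega)
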